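-- pv_equiv track=rewrite | github.com/Isa23300/PointClouds | dgcnn.pytorch-master/showplt_lrall.py | get5
-- ===== SOURCE A (Python) =====
-- def get5(ls):
--     n = -1
--     lsnew = []
--     for i in ls:
--         n = n + 1
--         if n % 15 == 0 or n == (len(ls)-1):
--             lsnew.append(i)
--     return lsnew
-- ===== SOURCE B (Python) =====
-- def get5(ls):
--     lsnew = list(ls[::15])
--     if ls and (len(ls) - 1) % 15 != 0:
--         lsnew.append(ls[-1])
--     return lsnew
-- ===== Notes on version B (the rewrite author's own statement) =====
-- stated objective: simpler
-- what changed: Replaces A's per-element counter loop with a modulo test per element by a single strided slice ls[::15] plus one boundary append of the last element.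
import Mathlib
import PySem

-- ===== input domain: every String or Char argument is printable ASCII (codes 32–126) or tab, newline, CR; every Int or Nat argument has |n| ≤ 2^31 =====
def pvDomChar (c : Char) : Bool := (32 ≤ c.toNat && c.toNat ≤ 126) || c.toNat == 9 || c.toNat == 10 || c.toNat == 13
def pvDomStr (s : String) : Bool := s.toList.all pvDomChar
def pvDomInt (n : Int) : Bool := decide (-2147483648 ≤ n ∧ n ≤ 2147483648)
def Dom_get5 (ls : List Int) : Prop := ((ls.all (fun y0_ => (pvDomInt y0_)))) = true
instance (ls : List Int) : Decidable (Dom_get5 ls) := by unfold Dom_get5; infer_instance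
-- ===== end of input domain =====

-- B replaces A's counter-with-modulo loop by a strided slice ls[::15] plus one boundary append of the last element (simpler).

-- ===== PORT A =====
def get5 (ls : List Int) : List Int :=
  (ls.foldl (fun (s : Int × List Int) i =>
      let n := s.1 + 1
      (n, if PySem.Int.mod n 15 == 0 || n == (ls.length : Int) - 1 then s.2 ++ [i] else s.2))
    (-1, ([] : List Int))).2

-- ===== PORT B =====
def get5_alt (ls : List Int) : List Int :=
  let lsnew := (PySem.List.slice? ls none none 15).getD []
  if ls ≠ [] ∧ PySem.Int.mod ((ls.length : Int) - 1) 15 ≠ 0 then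
    lsnew ++ [PySem.List.pyGetD ls (-1) 0]
  else lsnew

-- ===== PRECONDITION & SPEC =====
def Spec_get5 (ls : List Int) (out : List Int) : Prop := out = get5_alt ls
instance (ls : List Int) (out : List Int) : Decidable (Spec_get5 ls out) := by unfold Spec_get5; infer_instance

-- ===== CLAIM (what is proved, stated in full; the proofs are below) =====
def Claim_equal_get5 : Prop := ∀ (ls : List Int), Dom_get5 ls → Spec_get5 ls (get5 ls)

-- ===== LEMMAS AND PROOFS =====

-- elements of xs whose counter (starting at c+1) satisfies p: what A's loop collects
def collect (p : Int → Bool) (c : Int) : List Int → List Int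
  | [] => []
  | i :: t => if p (c+1) then i :: collect p (c+1) t else collect p (c+1) t

-- every 15th element, next keeper k positions ahead: what B's slice collects
def stride : Nat → List Int → List Int
  | _, [] => []
  | 0, x :: t => x :: stride 14 t
  | (k+1), _ :: t => stride k t

lemma foldA (L : Int) : ∀ (xs : List Int) (c : Int) (acc : List Int),
    xs.foldl (fun (s : Int × List Int) i =>
      let n := s.1 + 1
      (n, if PySem.Int.mod n 15 == 0 || n == L - 1 then s.2 ++ [i] else s.2)) (c, acc)
      = (c + xs.length, acc ++ collect (fun n => PySem.Int.mod n 15 == 0 || n == L - 1) c xs) := by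
  intro xs
  induction xs with
  | nil => intro c acc; simp [collect]
  | cons x t ih =>
    intro c acc
    simp only [List.foldl_cons, collect]
    by_cases h : (PySem.Int.mod (c + 1) 15 == 0 || (c + 1) == L - 1) = true
    · rw [if_pos h, if_pos h, ih]
      refine Prod.ext ?_ ?_
      · simp; ring
      · simp
    · rw [if_neg h, if_neg h, ih]
      refine Prod.ext ?_ ?_
      · simp; ring
      · simp

lemma collect_congr (p p' : Int → Bool) : ∀ (xs : List Int) (c : Int),
    (∀ n, c < n → n ≤ c + xs.length → p n = p' n) → collect p c xs = collect p' c xs := by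
  intro xs
  induction xs with
  | nil => intro c _; rfl
  | cons x t ih =>
    intro c h
    have h1 : p (c+1) = p' (c+1) := h (c+1) (by omega)
      (by simp only [List.length_cons]; push_cast; omega)
    simp only [collect, h1,
      ih (c+1) (fun n hn1 hn2 => h n (by omega)
        (by simp only [List.length_cons] at hn2 ⊢; push_cast at hn2 ⊢; omega))]

lemma collect_append (p : Int → Bool) : ∀ (xs ys : List Int) (c : Int),
    collect p c (xs ++ ys) = collect p c xs ++ collect p (c + xs.length) ys := by
  intro xs
  induction xs with
  | nil => intro ys c; simp [collect]
  | cons x t ih =>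
    intro ys c
    simp only [List.cons_append, collect, ih]
    have hc : c + ((x :: t).length : Int) = (c + 1) + (t.length : Int) := by
      simp; ring
    rw [hc]
    by_cases h : p (c+1) = true
    · rw [if_pos h, if_pos h]; rfl
    · rw [if_neg h, if_neg h]

lemma collect_eq_stride : ∀ (xs : List Int) (c : Int) (m : Nat),
    (c + 1 + m) % 15 = 0 → m < 15 →
    collect (fun n => PySem.Int.mod n 15 == 0) c xs = stride m xs := by
  intro xs
  induction xs with
  | nil => intro c m _ _; cases m <;> rfl
  | cons x t ih =>
    intro c m h hm
    have hmod : PySem.Int.mod (c+1) 15 = (c+1) % 15 :=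
      PySem.Int.mod_eq_emod_of_pos (by norm_num)
    cases m with
    | zero =>
      have hz : (c+1) % 15 = 0 := by omega
      simp only [collect, stride, hmod, hz, beq_self_eq_true, if_true]
      congr 1
      exact ih (c+1) 14 (by omega) (by omega)
    | succ k =>
      have hnz : (c+1) % 15 ≠ 0 := by omega
      simp only [collect, stride, hmod]
      rw [if_neg (by simp [hnz])]
      exact ih (c+1) k (by omega) (by omega)

lemma stride_eq_drop : ∀ (k : Nat) (xs : List Int), stride k xs = stride 0 (xs.drop k) := by
  intro k
  induction k with
  | zero => intro xs; simp
  | succ n ih =>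
    intro xs
    cases xs with
    | nil => rfl
    | cons x t => simp only [stride, List.drop_succ_cons, ih]

lemma slice_body_eq_stride : ∀ (n : Nat) (ls : List Int), ls.length ≤ n →
    (List.range ((ls.length + 14) / 15)).filterMap (fun k => ls[15 * k]?) = stride 0 ls := by
  intro n
  induction n with
  | zero =>
    intro ls h
    have : ls = [] := List.eq_nil_of_length_eq_zero (by omega)
    subst this; rfl
  | succ n ih =>
    intro ls h
    cases ls with
    | nil => rfl
    | cons x t =>
      have hcount : ((x :: t).length + 14) / 15 = (((x :: t).drop 15).length + 14) / 15 + 1 := by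
        simp only [List.length_cons, List.length_drop]; omega
      rw [hcount, List.range_succ_eq_map, List.filterMap_cons, List.filterMap_map]
      have h0 : (x :: t)[15 * 0]? = some x := rfl
      rw [h0]
      have hfun : ∀ k : Nat, (x :: t)[15 * (Nat.succ k)]? = ((x :: t).drop 15)[15 * k]? := by
        intro k
        rw [List.getElem?_drop]
        congr 1
        omega
      have : (fun k => (x :: t)[15 * k]?) ∘ Nat.succ = fun k => ((x :: t).drop 15)[15 * k]? := by
        funext k; exact hfun k
      have hdl : ((x :: t).drop 15).length ≤ n := by
        simp only [List.length_drop, List.length_cons] at h ⊢; omega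
      rw [this, ih ((x :: t).drop 15) hdl]
      show _ = stride 0 (x :: t)
      simp only [stride]
      rw [stride_eq_drop 14 t]
      rfl

lemma slice_eval (ls : List Int) :
    (PySem.List.slice? ls none none 15).getD [] =
      (List.range ((ls.length + 14) / 15)).filterMap (fun k => ls[15 * k]?) := by
  simp only [PySem.List.slice?, PySem.List.sliceIndices]
  norm_num
  have hc : (if 0 < ls.length then (((ls.length : Int) + 15 - 1) / 15).toNat else 0)
      = (ls.length + 14) / 15 := by
    split_ifs <;> omega
  rw [hc]
  apply List.filterMap_congr
  intro k _
  congr 1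

lemma get5_eq_collect (ls : List Int) :
    get5 ls = collect (fun n => PySem.Int.mod n 15 == 0 || n == (ls.length : Int) - 1) (-1) ls := by
  unfold get5
  rw [foldA (ls.length : Int)]
  simp

lemma get5_eq (ls : List Int) : get5 ls = get5_alt ls := by
  rcases List.eq_nil_or_concat ls with rfl | ⟨ys, x, rfl⟩
  · decide
  · simp only [List.concat_eq_append]
    have hlen : ((ys ++ [x]).length : Int) - 1 = (ys.length : Int) := by simp
    rw [get5_eq_collect, collect_append]
    have hlast : collect (fun n => PySem.Int.mod n 15 == 0
          || n == ((ys ++ [x]).length : Int) - 1) (-1 + ys.length) [x] = [x] := by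
      simp only [collect]
      rw [if_pos (by
        have hs : (-1 : Int) + ↑ys.length + 1 = (ys.length : Int) := by ring
        rw [hs, hlen]; simp)]
    have hpre : collect (fun n => PySem.Int.mod n 15 == 0
          || n == ((ys ++ [x]).length : Int) - 1) (-1) ys
        = collect (fun n => PySem.Int.mod n 15 == 0) (-1) ys := by
      apply collect_congr
      intro n h1 h2
      have hne : (n == ((ys ++ [x]).length : Int) - 1) = false := by
        simp only [hlen, beq_eq_false_iff_ne, ne_eq]
        omega
      rw [hne, Bool.or_false]
    rw [hlast, hpre]
    simp only [get5_alt]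
    rw [slice_eval, slice_body_eq_stride (ys ++ [x]).length _ le_rfl,
      ← collect_eq_stride (ys ++ [x]) (-1) 0 (by omega) (by omega), collect_append]
    have hshift : (-1 : Int) + (ys.length : Int) + 1 = (ys.length : Int) := by ring
    have hq1 : collect (fun n => PySem.Int.mod n 15 == 0) (-1 + ys.length) [x]
        = if PySem.Int.mod ((ys.length : Int)) 15 == 0 then [x] else [] := by
      simp only [collect, hshift]
    rw [hq1]
    by_cases hmod : PySem.Int.mod ((ys.length : Int)) 15 = 0
    · rw [if_neg (fun hcond => hcond.2 (by rw [hlen]; exact hmod))]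
      rw [if_pos (by simp only [hmod, beq_self_eq_true])]
    · rw [if_pos ⟨by simp, by rw [hlen]; exact hmod⟩]
      rw [if_neg (by simp only [beq_iff_eq]; exact hmod), List.append_nil,
        PySem.List.pyGetD_neg_one_append_singleton]

-- ===== VERDICT (by name: the statement is the Claim_ definition above) =====
theorem get5_spec : Claim_equal_get5 := by
  intro ls _
  exact get5_eq ls
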